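-- pv_equiv track=rewrite | github.com/davidl71/Aether | python/integration/yield_curve_comparison.py | _tenor_label
-- ===== SOURCE A (Python) =====
-- TENOR_LABELS = {
--     1: "O/N", 30: "1M", 60: "2M", 90: "3M", 120: "4M",
--     180: "6M", 270: "9M", 365: "1Y", 730: "2Y", 1095: "3Y",
--     1825: "5Y", 2555: "7Y", 3650: "10Y", 7300: "20Y", 10950: "30Y",
-- }
--
-- def _tenor_label(dte: int) -> str:
--     if dte in TENOR_LABELS:
--         return TENOR_LABELS[dte]
--     for key_dte, label in sorted(TENOR_LABELS.items()):
--         if abs(dte - key_dte) <= 5: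
--             return label
--     if dte < 30:
--         return f"{dte}d"
--     months = round(dte / 30)
--     if months <= 12:
--         return f"{months}M"
--     years = round(dte / 365, 1)
--     return f"{years}Y"
-- ===== SOURCE B (Python) =====
-- _KEYS = [1, 30, 60, 90, 120, 180, 270, 365, 730, 1095, 1825, 2555, 3650, 7300, 10950]
-- _LABELS = ["O/N", "1M", "2M", "3M", "4M", "6M", "9M", "1Y", "2Y", "3Y",
--            "5Y", "7Y", "10Y", "20Y", "30Y"]
--
-- def _tenor_label(dte: int) -> str:
--     # binary search for the insertion point of dte among the sorted keys;
--     # only the two neighbouring keys can be within 5 days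
--     lo, hi = 0, len(_KEYS)
--     while lo < hi:
--         mid = (lo + hi) // 2
--         if _KEYS[mid] < dte:
--             lo = mid + 1
--         else:
--             hi = mid
--     for i in (lo - 1, lo):
--         if 0 <= i < len(_KEYS) and abs(dte - _KEYS[i]) <= 5:
--             return _LABELS[i]
--     if dte < 30:
--         return f"{dte}d"
--     months = round(dte / 30)
--     if months <= 12:
--         return f"{months}M"
--     years = round(dte / 365, 1)
--     return f"{years}Y"
-- ===== Notes on version B (the rewrite author's own statement) =====
-- stated objective: alternative
-- what changed: B replaces A's dict-membership test plus sorted-items linear scan with a hand-written binary search over two parallel sorted arrays, checking only the two keys adjacent to the insertion point; the numeric fallback is kept identical.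
import Mathlib
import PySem

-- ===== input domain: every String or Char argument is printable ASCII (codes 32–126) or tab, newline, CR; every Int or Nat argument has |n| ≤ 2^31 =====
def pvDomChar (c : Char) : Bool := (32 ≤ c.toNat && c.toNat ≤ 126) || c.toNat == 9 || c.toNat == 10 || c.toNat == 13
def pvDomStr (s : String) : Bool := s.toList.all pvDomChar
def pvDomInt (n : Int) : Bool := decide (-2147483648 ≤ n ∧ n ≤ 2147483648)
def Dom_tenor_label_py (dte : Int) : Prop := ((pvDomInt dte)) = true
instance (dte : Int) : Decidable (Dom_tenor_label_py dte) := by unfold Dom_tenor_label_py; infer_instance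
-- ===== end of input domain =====

-- B replaces A's dict-membership test + sorted-scan by a hand-written binary search on the sorted
-- key array, probing only the two neighbours of the insertion point (objective: alternative).

-- round(dte / 30): banker's rounding of the exact rational dte/30.  Exact port: the only tie
-- cases (dte ≡ 15 mod 30) give a float that is exactly k + 0.5, and all other quotients are at
-- least 1/30 away from any half-integer while the float error is far smaller.
def roundDiv30 (dte : Int) : Int :=
  let q := PySem.Int.floordiv dte 30
  let r := PySem.Int.mod dte 30
  if r < 15 then q
  else if 15 < r then q + 1
  else if PySem.Int.mod q 2 = 0 then q else q + 1

-- f"{round(dte / 365, 1)}Y": on this branch dte ≥ 0, the rounded value t/10 (t = tenths) is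
-- never a tie (4*dte = 73*odd is impossible) and its repr always prints as "<t/10>.<t%10>".
-- Exact for |dte| ≤ 2^31 (float error ≪ distance of dte/365 to any half-tenth).
def yearsStr (dte : Int) : String :=
  let t := PySem.Int.floordiv (4 * dte + 73) 146
  PySem.Int.toStr (PySem.Int.floordiv t 10) ++ "." ++ PySem.Int.toStr (PySem.Int.mod t 10) ++ "Y"

-- the numeric fallback shared verbatim by both Python versions
def tenorFallback (dte : Int) : String :=
  if dte < 30 then PySem.Int.toStr dte ++ "d"
  else
    let months := roundDiv30 dte
    if months ≤ 12 then PySem.Int.toStr months ++ "M"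
    else yearsStr dte

-- ===== PORT A =====
-- TENOR_LABELS (keys already in ascending order)
def tenorTable : List (Int × String) :=
  [(1, "O/N"), (30, "1M"), (60, "2M"), (90, "3M"), (120, "4M"),
   (180, "6M"), (270, "9M"), (365, "1Y"), (730, "2Y"), (1095, "3Y"),
   (1825, "5Y"), (2555, "7Y"), (3650, "10Y"), (7300, "20Y"), (10950, "30Y")]

def tenorDict : PySem.Dict Int String := PySem.Dict.ofList tenorTable

-- keys of TENOR_LABELS are distinct, so Python's tuple sort of items() = sort on the first component
def tenor_label_py (dte : Int) : String :=
  match tenorDict.get? dte with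
  | some lbl => lbl
  | none =>
    match (PySem.List.sorted tenorDict.items (fun p => p.1) false).find?
            (fun p => decide ((dte - p.1).natAbs ≤ 5)) with
    | some p => p.2
    | none => tenorFallback dte

-- ===== PORT B =====
-- Source B's two parallel sorted arrays
def tenorKeys : List Int := [1, 30, 60, 90, 120, 180, 270, 365, 730, 1095, 1825, 2555, 3650, 7300, 10950]
def tenorLabs : List String := ["O/N", "1M", "2M", "3M", "4M", "6M", "9M", "1Y", "2Y", "3Y", "5Y", "7Y", "10Y", "20Y", "30Y"]

-- the 'while lo < hi' binary-search loop; fuel 15 ≥ hi - lo, so the loop always finishes on its own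
def bsLoop (dte : Int) : Nat → Nat → Nat → Nat
  | 0, lo, _ => lo
  | fuel + 1, lo, hi =>
    if lo < hi then
      let mid := (lo + hi) / 2
      if tenorKeys.getD mid 0 < dte then bsLoop dte fuel (mid + 1) hi
      else bsLoop dte fuel lo mid
    else lo

-- 'if 0 <= i < len(_KEYS) and abs(dte - _KEYS[i]) <= 5: return _LABELS[i]' for one candidate i
def tryNear (dte i : Int) : Option String :=
  if 0 ≤ i ∧ i < (tenorKeys.length : Int) then
    if (dte - tenorKeys.getD i.toNat 0).natAbs ≤ 5 then some (tenorLabs.getD i.toNat "") else none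
  else none

def tenor_label_py_alt (dte : Int) : String :=
  let lo := bsLoop dte 15 0 tenorKeys.length
  match tryNear dte ((lo : Int) - 1) with
  | some lbl => lbl
  | none =>
    match tryNear dte (lo : Int) with
    | some lbl => lbl
    | none => tenorFallback dte

-- ===== PRECONDITION & SPEC =====
def Spec_tenor_label_py (dte : Int) (out : String) : Prop := out = tenor_label_py_alt dte
instance (dte : Int) (out : String) : Decidable (Spec_tenor_label_py dte out) := by unfold Spec_tenor_label_py; infer_instance

-- ===== CLAIM (what is proved, stated in full; the proofs are below) =====
def Claim_equal_tenor_label_py : Prop := ∀ (dte : Int), Dom_tenor_label_py dte → Spec_tenor_label_py dte (tenor_label_py dte)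

-- ===== LEMMAS AND PROOFS =====

-- dte is not within 5 of any tenor key ⇒ A falls through to the fallback
theorem tenor_A_far (dte : Int) (h : ∀ k ∈ tenorKeys, 5 < (dte - k).natAbs) :
    tenor_label_py dte = tenorFallback dte := by
  have hg : tenorDict.get? dte = none := by
    rw [PySem.Dict.get?_eq_none_iff_not_mem_keys]
    intro hm
    rw [show tenorDict.keys = tenorKeys from by decide] at hm
    have := h dte hm
    omega
  have hs : PySem.List.sorted tenorDict.items (fun p => p.1) false = tenorTable := by decide
  have hf : (PySem.List.sorted tenorDict.items (fun p => p.1) false).find?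
      (fun p => decide ((dte - p.1).natAbs ≤ 5)) = none := by
    rw [hs, List.find?_eq_none]
    intro p hp
    have hpk : p.1 ∈ tenorKeys := by
      simp only [tenorTable, List.mem_cons, List.not_mem_nil, or_false] at hp
      rcases hp with rfl|rfl|rfl|rfl|rfl|rfl|rfl|rfl|rfl|rfl|rfl|rfl|rfl|rfl|rfl <;> simp [tenorKeys]
    have := h p.1 hpk
    simp only [decide_eq_true_eq]
    omega
  unfold tenor_label_py
  rw [hg, hf]

-- dte is not within 5 of any tenor key ⇒ every candidate probe of B fails
theorem tryNear_none (dte : Int) (h : ∀ k ∈ tenorKeys, 5 < (dte - k).natAbs) (i : Int) :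
    tryNear dte i = none := by
  have h1 := h 1 (by simp [tenorKeys]);   have h2 := h 30 (by simp [tenorKeys])
  have h3 := h 60 (by simp [tenorKeys]);  have h4 := h 90 (by simp [tenorKeys])
  have h5 := h 120 (by simp [tenorKeys]); have h6 := h 180 (by simp [tenorKeys])
  have h7 := h 270 (by simp [tenorKeys]); have h8 := h 365 (by simp [tenorKeys])
  have h9 := h 730 (by simp [tenorKeys]); have h10 := h 1095 (by simp [tenorKeys])
  have h11 := h 1825 (by simp [tenorKeys]); have h12 := h 2555 (by simp [tenorKeys])
  have h13 := h 3650 (by simp [tenorKeys]); have h14 := h 7300 (by simp [tenorKeys])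
  have h15 := h 10950 (by simp [tenorKeys])
  unfold tryNear
  split_ifs with hb hn
  · exfalso
    obtain ⟨hl, hr⟩ := hb
    have hr' : i < 15 := by simpa [tenorKeys] using hr
    interval_cases i <;> simp [tenorKeys] at hn <;> omega
  · rfl
  · rfl

-- dte is not within 5 of any tenor key ⇒ B falls through to the fallback
theorem tenor_B_far (dte : Int) (h : ∀ k ∈ tenorKeys, 5 < (dte - k).natAbs) :
    tenor_label_py_alt dte = tenorFallback dte := by
  unfold tenor_label_py_alt
  simp only [tryNear_none dte h]

-- ===== VERDICT (by name: the statement is the Claim_ definition above) =====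
theorem tenor_label_py_spec : Claim_equal_tenor_label_py := by
  intro dte _
  unfold Spec_tenor_label_py
  by_cases hnear : (dte - 1).natAbs ≤ 5 ∨ (dte - 30).natAbs ≤ 5 ∨ (dte - 60).natAbs ≤ 5 ∨
      (dte - 90).natAbs ≤ 5 ∨ (dte - 120).natAbs ≤ 5 ∨ (dte - 180).natAbs ≤ 5 ∨
      (dte - 270).natAbs ≤ 5 ∨ (dte - 365).natAbs ≤ 5 ∨ (dte - 730).natAbs ≤ 5 ∨
      (dte - 1095).natAbs ≤ 5 ∨ (dte - 1825).natAbs ≤ 5 ∨ (dte - 2555).natAbs ≤ 5 ∨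
      (dte - 3650).natAbs ≤ 5 ∨ (dte - 7300).natAbs ≤ 5 ∨ (dte - 10950).natAbs ≤ 5
  · rcases hnear with h|h|h|h|h|h|h|h|h|h|h|h|h|h|h
    · have hlo : (-4:Int) ≤ dte := by omega
      have hhi : dte ≤ (6:Int) := by omega
      interval_cases dte <;> decide
    · have hlo : (25:Int) ≤ dte := by omega
      have hhi : dte ≤ (35:Int) := by omega
      interval_cases dte <;> decide
    · have hlo : (55:Int) ≤ dte := by omega
      have hhi : dte ≤ (65:Int) := by omega
      interval_cases dte <;> decide
    · have hlo : (85:Int) ≤ dte := by omega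
      have hhi : dte ≤ (95:Int) := by omega
      interval_cases dte <;> decide
    · have hlo : (115:Int) ≤ dte := by omega
      have hhi : dte ≤ (125:Int) := by omega
      interval_cases dte <;> decide
    · have hlo : (175:Int) ≤ dte := by omega
      have hhi : dte ≤ (185:Int) := by omega
      interval_cases dte <;> decide
    · have hlo : (265:Int) ≤ dte := by omega
      have hhi : dte ≤ (275:Int) := by omega
      interval_cases dte <;> decide
    · have hlo : (360:Int) ≤ dte := by omega
      have hhi : dte ≤ (370:Int) := by omega
      interval_cases dte <;> decide
    · have hlo : (725:Int) ≤ dte := by omega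
      have hhi : dte ≤ (735:Int) := by omega
      interval_cases dte <;> decide
    · have hlo : (1090:Int) ≤ dte := by omega
      have hhi : dte ≤ (1100:Int) := by omega
      interval_cases dte <;> decide
    · have hlo : (1820:Int) ≤ dte := by omega
      have hhi : dte ≤ (1830:Int) := by omega
      interval_cases dte <;> decide
    · have hlo : (2550:Int) ≤ dte := by omega
      have hhi : dte ≤ (2560:Int) := by omega
      interval_cases dte <;> decide
    · have hlo : (3645:Int) ≤ dte := by omega
      have hhi : dte ≤ (3655:Int) := by omega
      interval_cases dte <;> decide
    · have hlo : (7295:Int) ≤ dte := by omega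
      have hhi : dte ≤ (7305:Int) := by omega
      interval_cases dte <;> decide
    · have hlo : (10945:Int) ≤ dte := by omega
      have hhi : dte ≤ (10955:Int) := by omega
      interval_cases dte <;> decide
  · push Not at hnear
    obtain ⟨h1, h2, h3, h4, h5, h6, h7, h8, h9, h10, h11, h12, h13, h14, h15⟩ := hnear
    have hfar : ∀ k ∈ tenorKeys, 5 < (dte - k).natAbs := by
      intro k hk
      simp only [tenorKeys, List.mem_cons, List.not_mem_nil, or_false] at hk
      rcases hk with rfl|rfl|rfl|rfl|rfl|rfl|rfl|rfl|rfl|rfl|rfl|rfl|rfl|rfl|rfl <;> omega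
    rw [tenor_A_far dte hfar, tenor_B_far dte hfar]
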